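-- pv_equiv track=rewrite | github.com/josejoby/programming_questions | python/string_count_ag_pair.py | carry_forward
-- ===== SOURCE A (Python) =====
-- def carry_forward(s):
--     """
--     i
--     0   a=1 ag=0
--     3   a=1 ag=1 - found g
--     4   a=2 ag=1
--     5   a=2 ag=ag+a_count - found g
--     """
--     ag_count = 0
--     a_count = 0
--     for i in range(len(s)):
--         if s[i] == 'a':
--             a_count +=1
--         elif s[i] == 'g':
--             ag_count=ag_count+a_count
--     return ag_count
-- ===== SOURCE B (Python) =====
-- def carry_forward(s):
--     # For every 'g', count the 'a's in the prefix before it, and sum.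
--     return sum(s[:i].count('a') for i, c in enumerate(s) if c == 'g')
-- ===== Notes on version B (the rewrite author's own statement) =====
-- stated objective: alternative
-- what changed: Replaces the single-pass running a-counter with an independent rescan: for each 'g' position the prefix before it is sliced and its 'a's counted, and these counts are summed.
import Mathlib
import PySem

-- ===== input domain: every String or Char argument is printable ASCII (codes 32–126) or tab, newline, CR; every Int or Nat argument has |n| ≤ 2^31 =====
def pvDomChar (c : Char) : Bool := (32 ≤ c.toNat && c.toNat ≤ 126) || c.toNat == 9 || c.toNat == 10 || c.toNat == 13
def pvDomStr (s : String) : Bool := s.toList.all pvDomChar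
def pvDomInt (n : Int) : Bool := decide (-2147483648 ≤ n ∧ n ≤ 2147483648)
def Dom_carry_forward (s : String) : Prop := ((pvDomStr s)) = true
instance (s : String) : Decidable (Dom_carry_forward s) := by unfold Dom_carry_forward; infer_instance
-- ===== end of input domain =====

-- B replaces A's single-pass running a-counter with a per-'g' rescan of the prefix (alternative decomposition, not faster).

-- ===== PORT A =====
-- A: one pass, keeping (ag_count, a_count) as running state.
def carry_forward (s : String) : Int :=
  (s.toList.foldl
    (fun (st : Int × Int) c =>
      if c = 'a' then (st.1, st.2 + 1)
      else if c = 'g' then (st.1 + st.2, st.2)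
      else st)
    (0, 0)).1

-- ===== PORT B =====
-- B: sum(s[:i].count('a') for i, c in enumerate(s) if c == 'g')
def carry_forward_alt (s : String) : Int :=
  (PySem.List.enumerate s.toList).foldl
    (fun acc ic =>
      if ic.2 = 'g' then
        acc + ((PySem.Chars.count (PySem.List.slice s.toList none (some ic.1)) ['a'] : Nat) : Int)
      else acc)
    0

-- ===== PRECONDITION & SPEC =====
def Spec_carry_forward (s : String) (out : Int) : Prop := out = carry_forward_alt s
instance (s : String) (out : Int) : Decidable (Spec_carry_forward s out) := by unfold Spec_carry_forward; infer_instance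

-- ===== CLAIM (what is proved, stated in full; the proofs are below) =====
def Claim_equal_carry_forward : Prop := ∀ (s : String), Dom_carry_forward s → Spec_carry_forward s (carry_forward s)

-- ===== LEMMAS AND PROOFS =====

-- Python's str.count with a single-character needle is List.count (no overlap issues).
lemma count_go_single (c : Char) : ∀ (fuel : Nat) (l : List Char) (acc : Nat),
    l.length ≤ fuel → PySem.Chars.count.go [c] fuel l acc = acc + l.count c := by
  intro fuel
  induction fuel with
  | zero =>
    intro l acc h
    cases l with
    | nil => simp [PySem.Chars.count.go]
    | cons x t => simp at h
  | succ n ih =>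
    intro l acc h
    cases l with
    | nil => simp [PySem.Chars.count.go]
    | cons x t =>
      by_cases hx : x = c
      · subst hx
        have : [x].isPrefixOf (x :: t) = true := by simp [List.isPrefixOf]
        simp only [PySem.Chars.count.go, this, if_pos, List.length_cons, List.drop_succ_cons,
          List.length_nil, List.drop_zero]
        simp only [List.length_cons] at h
        rw [ih t (acc + 1) (by omega)]
        simp
        omega
      · have : [c].isPrefixOf (x :: t) = false := by
          simp [List.isPrefixOf]
          intro hc; exact absurd hc.symm hx
        simp only [PySem.Chars.count.go, this]
        simp only [List.length_cons] at h
        rw [ih t acc (by omega)]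
        simp [hx]

lemma count_single (l : List Char) (c : Char) :
    PySem.Chars.count l [c] = l.count c := by
  have h := count_go_single c l.length l 0 (le_refl _)
  simp only [PySem.Chars.count, List.isEmpty, Bool.false_eq_true, if_false] at *
  omega

-- Loop invariant: folding A over the rest l with a_count = (count of 'a' in the prefix p)
-- equals B's enumerate-fold over l starting at index p.length, slicing prefixes of t = p ++ l.
lemma main_inv (t : List Char) : ∀ (l p : List Char), p ++ l = t → ∀ (ag : Int),
    (l.foldl
      (fun (st : Int × Int) c =>
        if c = 'a' then (st.1, st.2 + 1)
        else if c = 'g' then (st.1 + st.2, st.2)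
        else st)
      (ag, (p.count 'a' : Int))).1
    = (PySem.List.enumerate l (p.length : Int)).foldl
        (fun acc ic =>
          if ic.2 = 'g' then
            acc + ((PySem.Chars.count (PySem.List.slice t none (some ic.1)) ['a'] : Nat) : Int)
          else acc)
        ag := by
  intro l
  induction l with
  | nil => intro p hp ag; simp [PySem.List.enumerate]
  | cons c l' ih =>
    intro p hp ag
    rw [PySem.List.enumerate_cons]
    have hnext : (p ++ [c]) ++ l' = t := by simpa using hp
    have hlen : ((p ++ [c]).length : Int) = (p.length : Int) + 1 := by simp
    have htake : t.take p.length = p := by rw [← hp]; simp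
    have hc2 : ((PySem.Chars.count (List.take p.length t) ['a'] : Nat) : Int)
        = (p.count 'a' : Int) := by rw [htake, count_single]
    by_cases ha : c = 'a'
    · subst ha
      have hcnt : ((p ++ ['a']).count 'a' : Int) = (p.count 'a' : Int) + 1 := by
        simp [List.count_append]
      have h2 := ih (p ++ ['a']) hnext ag
      rw [hlen, hcnt] at h2
      simpa using h2
    · by_cases hg : c = 'g'
      · subst hg
        have hcnt : ((p ++ ['g']).count 'a' : Int) = (p.count 'a' : Int) := by
          simp [List.count_append]
        have h2 := ih (p ++ ['g']) hnext (ag + (p.count 'a' : Int))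
        rw [hlen, hcnt] at h2
        simpa [hc2] using h2
      · have hcnt : ((p ++ [c]).count 'a' : Int) = (p.count 'a' : Int) := by
          simp [List.count_append, ha]
        have h2 := ih (p ++ [c]) hnext ag
        rw [hlen, hcnt] at h2
        simpa [ha, hg] using h2

-- ===== VERDICT (by name: the statement is the Claim_ definition above) =====
theorem carry_forward_spec : Claim_equal_carry_forward := by
  intro s _
  unfold Spec_carry_forward carry_forward carry_forward_alt
  have := main_inv s.toList s.toList [] rfl 0
  simpa [PySem.List.enumerate] using this
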